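-- pv_equiv track=rewrite | github.com/Zanthras/Sudoku-Solver | solvers/locked_pairs.py | return_pair_combos
-- ===== SOURCE A (Python) =====
-- def return_pair_combos(pairs):
--     if len(pairs) < 2:
--         return []
--     if len(pairs) == 2:
--         return [pairs]
--     else:
--         combolist = []
--         inverse_plus_combolist = []
--         for firstpair in pairs:
--             for secondpair in pairs:
--                 if firstpair != secondpair:
--                     plist = [firstpair, secondpair]
--                     inverseplist = [secondpair, firstpair]
--                     if plist not in inverse_plus_combolist:
--                         combolist.append(plist)
--                         # add to full list so i dont process again
--                         inverse_plus_combolist.append(plist)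
--                         inverse_plus_combolist.append(inverseplist)
--         return combolist
-- ===== SOURCE B (Python) =====
-- def _all_pairs(vals):
--     if not vals:
--         return []
--     head, rest = vals[0], vals[1:]
--     return [[head, y] for y in rest] + _all_pairs(rest)
--
--
-- def return_pair_combos(pairs):
--     if len(pairs) < 2:
--         return []
--     if len(pairs) == 2:
--         return [pairs]
--     uniq = []
--     for v in pairs:
--         if v not in uniq:
--             uniq.append(v)
--     return _all_pairs(uniq)
-- ===== Notes on version B (the rewrite author's own statement) =====
-- stated objective: faster
-- what changed: A's single nested loop over the raw list with a rescanned inverse_plus_combolist is replaced by a one-pass first-occurrence dedup followed by a recursive triangular enumeration of the distinct values with no membership test during pairing.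
import Mathlib
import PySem

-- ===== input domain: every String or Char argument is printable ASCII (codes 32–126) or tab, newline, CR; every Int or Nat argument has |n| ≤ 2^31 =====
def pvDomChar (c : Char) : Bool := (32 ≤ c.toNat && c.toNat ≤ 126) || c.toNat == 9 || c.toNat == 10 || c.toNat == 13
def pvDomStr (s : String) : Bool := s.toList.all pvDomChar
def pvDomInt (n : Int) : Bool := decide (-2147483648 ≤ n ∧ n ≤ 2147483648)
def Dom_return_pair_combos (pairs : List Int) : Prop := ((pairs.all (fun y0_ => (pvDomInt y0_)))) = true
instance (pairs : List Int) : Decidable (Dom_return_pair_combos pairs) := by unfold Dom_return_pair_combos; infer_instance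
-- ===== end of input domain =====

-- B replaces A's quadratic scan with inverse-list filtering by a one-pass dedup followed by a
-- triangular pairing of the distinct values (same return value; objective: simpler/faster).

-- ===== PORT A =====
-- literal transliteration of A: nested loops over `pairs`, a combolist and an
-- inverse_plus_combolist carried as a pair of lists (plist/inverseplist inlined)
def return_pair_combos (pairs : List Int) : List (List Int) :=
  if pairs.length < 2 then []
  else if pairs.length = 2 then [pairs]
  else
    (pairs.foldl (fun st firstpair =>
      pairs.foldl (fun (st : List (List Int) × List (List Int)) secondpair =>
        if firstpair ≠ secondpair then
          if [firstpair, secondpair] ∉ st.2 then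
            (st.1 ++ [[firstpair, secondpair]],
             st.2 ++ [[firstpair, secondpair], [secondpair, firstpair]])
          else st
        else st) st) (([] : List (List Int)), ([] : List (List Int)))).1

-- ===== PORT B =====
-- B-side helper: _all_pairs from Source B (head/rest recursion)
def allPairs : List Int → List (List Int)
  | [] => []
  | x :: rest => rest.map (fun y => [x, y]) ++ allPairs rest

-- port of B: same two guards, then dedup (first occurrences) and triangular pairing
def return_pair_combos_alt (pairs : List Int) : List (List Int) :=
  if pairs.length < 2 then []
  else if pairs.length = 2 then [pairs]
  else
    allPairs (pairs.foldl (fun u v => if v ∈ u then u else u ++ [v]) ([] : List Int))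

-- ===== PRECONDITION & SPEC =====
def Spec_return_pair_combos (pairs : List Int) (out : List (List Int)) : Prop := out = return_pair_combos_alt pairs
instance (pairs : List Int) (out : List (List Int)) : Decidable (Spec_return_pair_combos pairs out) := by unfold Spec_return_pair_combos; infer_instance

-- ===== CLAIM (what is proved, stated in full; the proofs are below) =====
def Claim_equal_return_pair_combos : Prop := ∀ (pairs : List Int), Dom_return_pair_combos pairs → Spec_return_pair_combos pairs (return_pair_combos pairs)

-- ===== LEMMAS AND PROOFS =====

-- first-occurrence dedup, recursive form (proof-side reference object)
def filterNe (x : Int) : List Int → List Int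
  | [] => []
  | y :: l => if y = x then filterNe x l else y :: filterNe x l

lemma filterNe_eq (x : Int) : ∀ l : List Int, filterNe x l = l.filter (fun y => decide (y ≠ x)) := by
  intro l
  induction l with
  | nil => rfl
  | cons y l ih => by_cases h : y = x <;> simp [filterNe, h, ih]

lemma length_filterNe (x : Int) (l : List Int) : (filterNe x l).length ≤ l.length := by
  rw [filterNe_eq]; exact List.length_filter_le _ _

def fd : List Int → List Int
  | [] => []
  | x :: l => x :: fd (filterNe x l)
termination_by l => l.length
decreasing_by
  simp only [List.length_cons]
  exact Nat.lt_succ_of_le (length_filterNe _ _)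

lemma fd_cons (x : Int) (l : List Int) :
    fd (x :: l) = x :: fd (l.filter (fun y => decide (y ≠ x))) := by
  rw [fd, filterNe_eq]

lemma mem_fd (a : Int) : ∀ l : List Int, a ∈ fd l ↔ a ∈ l := by
  intro l
  induction l using fd.induct with
  | case1 => simp [fd]
  | case2 x l ih =>
      rw [filterNe_eq] at ih
      rw [fd, filterNe_eq]
      simp only [List.mem_cons, ih, List.mem_filter]
      by_cases h : a = x <;> simp [h]

lemma nodup_fd : ∀ l : List Int, (fd l).Nodup := by
  intro l
  induction l using fd.induct with
  | case1 => simp [fd]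
  | case2 x l ih =>
      rw [fd]
      simp only [List.nodup_cons]
      refine ⟨?_, ih⟩
      rw [mem_fd, filterNe_eq]
      simp [List.mem_filter]

-- fd commutes with filter
lemma fd_filter : ∀ (n : Nat) (l : List Int), l.length ≤ n →
    ∀ p : Int → Bool, fd (l.filter p) = (fd l).filter p := by
  intro n
  induction n with
  | zero =>
      intro l hl p
      have : l = [] := List.eq_nil_of_length_eq_zero (Nat.le_zero.mp hl)
      subst this; simp [fd]
  | succ n ih =>
      intro l hl p
      cases l with
      | nil => simp [fd]
      | cons x l =>
          have hlen : l.length ≤ n := by simpa using hl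
          have hlenf : ∀ q : Int → Bool, (l.filter q).length ≤ n :=
            fun q => le_trans (List.length_filter_le _ _) hlen
          by_cases hp : p x = true
          · rw [List.filter_cons_of_pos hp, fd_cons, fd_cons, List.filter_cons_of_pos hp]
            congr 1
            rw [List.filter_comm, ih _ (hlenf _) p]
          · have hp' : ¬ p x = true := hp
            have hmem : ∀ a ∈ fd (l.filter p), decide (a ≠ x) = true := by
              intro a ha
              have ha' : a ∈ l.filter p := (mem_fd a _).mp ha
              have hpa := (List.mem_filter.mp ha').2
              simp only [decide_eq_true_eq]
              rintro rfl; exact hp hpa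
            calc fd ((x :: l).filter p) = fd (l.filter p) := by
                  rw [List.filter_cons_of_neg hp']
              _ = (fd (l.filter p)).filter (fun y => decide (y ≠ x)) :=
                  (List.filter_eq_self.mpr hmem).symm
              _ = fd ((l.filter p).filter (fun y => decide (y ≠ x))) :=
                  (ih _ (hlenf p) _).symm
              _ = fd ((l.filter (fun y => decide (y ≠ x))).filter p) := by
                  rw [List.filter_comm]
              _ = (fd (l.filter (fun y => decide (y ≠ x)))).filter p := ih _ (hlenf _) p
              _ = (fd (x :: l)).filter p := by
                  rw [fd_cons, List.filter_cons_of_neg hp']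

-- B's accumulator dedup computes fd
lemma dedup_foldl : ∀ (l acc : List Int),
    l.foldl (fun u v => if v ∈ u then u else u ++ [v]) acc
      = acc ++ fd (l.filter (fun v => decide (v ∉ acc))) := by
  intro l
  induction l with
  | nil => simp [fd]
  | cons x l ih =>
      intro acc
      simp only [List.foldl_cons]
      by_cases hx : x ∈ acc
      · rw [if_pos hx, ih acc, List.filter_cons_of_neg (by simpa using hx)]
      · rw [if_neg hx, ih (acc ++ [x]), List.filter_cons_of_pos (by simpa using hx), fd_cons]
        have hf : l.filter (fun v => decide (v ∉ acc ++ [x]))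
            = (l.filter (fun v => decide (v ∉ acc))).filter (fun y => decide (y ≠ x)) := by
          rw [List.filter_filter]
          apply List.filter_congr
          intro a _
          by_cases h1 : a ∈ acc <;> by_cases h2 : a = x <;> simp [h1, h2]
        rw [hf]
        simp [List.append_assoc]

-- combo list after k outer "new value" passes
def triTake : Nat → List Int → List (List Int)
  | 0, _ => []
  | _ + 1, [] => []
  | k + 1, x :: l => l.map (fun y => [x, y]) ++ triTake k l

lemma triTake_ge : ∀ (u : List Int) (k : Nat), u.length ≤ k → triTake k u = allPairs u := by
  intro u
  induction u with
  | nil => intro k hk; cases k <;> rfl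
  | cons x l ih =>
      intro k hk
      cases k with
      | zero => simp at hk
      | succ k => simp only [triTake, allPairs, ih k (by simpa using hk)]

lemma triTake_succ : ∀ (u : List Int) (k : Nat) (h : k < u.length),
    triTake (k + 1) u = triTake k u ++ (u.drop (k + 1)).map (fun y => [u[k], y]) := by
  intro u
  induction u with
  | nil => intro k h; simp at h
  | cons x l ih =>
      intro k h
      cases k with
      | zero => simp [triTake]
      | succ k =>
          have hk : k < l.length := by simpa using h
          simp only [triTake, List.drop_succ_cons, List.getElem_cons_succ, ih k hk,
            List.append_assoc]

lemma mem_triTake : ∀ (u : List Int) (k : Nat) (a b : Int),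
    [a, b] ∈ triTake k u ↔ ∃ i, i < k ∧ ∃ h : i < u.length, u[i] = a ∧ b ∈ u.drop (i + 1) := by
  intro u
  induction u with
  | nil =>
      intro k a b
      cases k <;> simp [triTake]
  | cons x l ih =>
      intro k a b
      cases k with
      | zero => simp [triTake]
      | succ k =>
          simp only [triTake, List.mem_append, List.mem_map, ih]
          constructor
          · rintro (⟨y, hy, he⟩ | ⟨i, hik, hil, ha, hb⟩)
            · obtain ⟨rfl, rfl⟩ : x = a ∧ y = b := by
                injection he with h1 h2
                injection h2 with h3 _
                exact ⟨h1, h3⟩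
              exact ⟨0, Nat.succ_pos _, by simp, by simp, by simpa using hy⟩
            · exact ⟨i + 1, by omega, by simpa using Nat.succ_lt_succ hil,
                by simpa using ha, by simpa using hb⟩
          · rintro ⟨i, hik, hil, ha, hb⟩
            cases i with
            | zero =>
                left
                exact ⟨b, by simpa using hb, by simp at ha; rw [ha]⟩
            | succ i =>
                right
                exact ⟨i, by omega, by simpa using hil, by simpa using ha, by simpa using hb⟩

-- reduced single-state view of A's inner-loop body
def stepA (f : Int) (c : List (List Int)) (s : Int) : List (List Int) :=
  if f ≠ s ∧ [f, s] ∉ c ∧ [s, f] ∉ c then c ++ [[f, s]] else c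

def flatI (c : List (List Int)) : List (List Int) := c.flatMap (fun p => [p, p.reverse])

lemma mem_flatI (a b : Int) (c : List (List Int)) :
    [a, b] ∈ flatI c ↔ [a, b] ∈ c ∨ [b, a] ∈ c := by
  simp only [flatI, List.mem_flatMap, List.mem_cons, List.not_mem_nil, or_false]
  constructor
  · rintro ⟨p, hp, h | h⟩
    · exact Or.inl (h ▸ hp)
    · right
      have : p = [b, a] := by
        have := congrArg List.reverse h
        simpa using this.symm
      exact this ▸ hp
  · rintro (h | h)
    · exact ⟨[a, b], h, Or.inl rfl⟩
    · exact ⟨[b, a], h, Or.inr (by simp)⟩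

lemma innerA_pair (f : Int) : ∀ (m : List Int) (c : List (List Int)),
    m.foldl (fun (st : List (List Int) × List (List Int)) secondpair =>
        if f ≠ secondpair then
          if [f, secondpair] ∉ st.2 then
            (st.1 ++ [[f, secondpair]],
             st.2 ++ [[f, secondpair], [secondpair, f]])
          else st
        else st) (c, flatI c)
    = (m.foldl (stepA f) c, flatI (m.foldl (stepA f) c)) := by
  intro m
  induction m with
  | nil => intro c; rfl
  | cons s m ih =>
      intro c
      simp only [List.foldl_cons]
      have hstep : (if f ≠ s then
          if [f, s] ∉ (c, flatI c).2 then
            ((c, flatI c).1 ++ [[f, s]], (c, flatI c).2 ++ [[f, s], [s, f]])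
          else (c, flatI c)
        else (c, flatI c)) = (stepA f c s, flatI (stepA f c s)) := by
        unfold stepA
        by_cases hfs : f = s
        · simp [hfs]
        · by_cases hm : [f, s] ∈ flatI c
          · have hmc := (mem_flatI f s c).mp hm
            rw [if_pos hfs, if_neg (not_not_intro hm),
              if_neg (show ¬(f ≠ s ∧ [f, s] ∉ c ∧ [s, f] ∉ c) by tauto)]
          · have hm' := fun h => hm ((mem_flatI f s c).mpr h)
            rw [if_pos hfs, if_pos hm, if_pos ⟨hfs, fun h => hm' (Or.inl h), fun h => hm' (Or.inr h)⟩]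
            have : flatI (c ++ [[f, s]]) = flatI c ++ [[f, s], [s, f]] := by
              simp [flatI]
            rw [this]
      rw [hstep, ih]

-- A's pair-state loop tracks (combo, flatI combo)
lemma loopA_eq (q : List Int) : ∀ (ol : List Int) (c : List (List Int)),
    ol.foldl (fun st firstpair =>
      q.foldl (fun (st : List (List Int) × List (List Int)) secondpair =>
        if firstpair ≠ secondpair then
          if [firstpair, secondpair] ∉ st.2 then
            (st.1 ++ [[firstpair, secondpair]],
             st.2 ++ [[firstpair, secondpair], [secondpair, firstpair]])
          else st
        else st) st) (c, flatI c)
    = (ol.foldl (fun c f => q.foldl (stepA f) c) c,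
       flatI (ol.foldl (fun c f => q.foldl (stepA f) c) c)) := by
  intro ol
  induction ol with
  | nil => intro c; rfl
  | cons f ol ih =>
      intro c
      simp only [List.foldl_cons]
      rw [innerA_pair f q c, ih]

lemma getElem_mem_drop (u : List Int) (i j : Nat) (hij : i < j) (hj : j < u.length) :
    u[j] ∈ u.drop (i + 1) := by
  have h1 : j - (i + 1) < (u.drop (i + 1)).length := by
    simp only [List.length_drop]; omega
  have h2 : u[j] = (u.drop (i + 1))[j - (i + 1)]'h1 := by
    rw [List.getElem_drop]; congr 1; omega
  rw [h2]; exact List.getElem_mem _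

lemma blocked_old (u : List Int) (_hn : u.Nodup) (k : Nat) (f : Int) (hf : f ∈ u.take k)
    (s : Int) (hs : s ∈ u) : s = f ∨ [f, s] ∈ triTake k u ∨ [s, f] ∈ triTake k u := by
  obtain ⟨i, hi, hfi⟩ := List.getElem_of_mem hf
  have hik : i < k := by simp at hi; omega
  have hil : i < u.length := by simp at hi; omega
  have hfi' : u[i] = f := by rw [← hfi]; exact (List.getElem_take).symm
  obtain ⟨j, hj, hsj⟩ := List.getElem_of_mem hs
  rcases lt_trichotomy i j with hij | hij | hij
  · right; left
    exact (mem_triTake u k f s).mpr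
      ⟨i, hik, hil, hfi', by rw [← hsj]; exact getElem_mem_drop u i j hij hj⟩
  · left; subst hij; rw [← hsj]; exact hfi'
  · right; right
    exact (mem_triTake u k s f).mpr
      ⟨j, by omega, hj, hsj, by rw [← hfi']; exact getElem_mem_drop u j i hij hil⟩

-- an already-seen outer value is completely blocked: its inner pass is a no-op
lemma inner_old (u : List Int) (hn : u.Nodup) (k : Nat) (f : Int) (hf : f ∈ u.take k) :
    ∀ (m : List Int), (∀ s ∈ m, s ∈ u) → m.foldl (stepA f) (triTake k u) = triTake k u := by
  intro m
  induction m with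
  | nil => intro _; rfl
  | cons s m ih =>
      intro hm
      simp only [List.foldl_cons]
      have hstep : stepA f (triTake k u) s = triTake k u := by
        unfold stepA
        rcases blocked_old u hn k f hf s (hm s (by simp)) with h | h | h
        all_goals rw [if_neg (by tauto)]
      rw [hstep]
      exact ih (fun t ht => hm t (by simp [ht]))

def collect (p : Int → Bool) (E m : List Int) : List Int :=
  m.foldl (fun E s => if p s = true ∧ s ∉ E then E ++ [s] else E) E

lemma collect_eq : ∀ (n : Nat) (m : List Int), m.length ≤ n → ∀ (p : Int → Bool) (E : List Int),
    collect p E m = E ++ (fd m).filter (fun s => p s && decide (s ∉ E)) := by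
  intro n
  induction n with
  | zero =>
      intro m hm p E
      have : m = [] := List.eq_nil_of_length_eq_zero (Nat.le_zero.mp hm)
      subst this; simp [collect, fd]
  | succ n ih =>
      intro m hm p E
      cases m with
      | nil => simp [collect, fd]
      | cons x m =>
          have hlen : m.length ≤ n := by simpa using hm
          by_cases hx : p x = true ∧ x ∉ E
          · rw [show collect p E (x :: m) = collect p (E ++ [x]) m from by
              simp [collect, List.foldl_cons, if_pos hx]]
            rw [ih m hlen p (E ++ [x]), fd_cons,
              List.filter_cons_of_pos (by simp [hx.1, hx.2]),
              fd_filter n m hlen, List.filter_filter]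
            rw [List.filter_congr (q := fun s => p s && decide (s ∉ E ++ [x]))
              (by intro a _
                  by_cases h1 : p a = true <;> by_cases h2 : a ∈ E <;> by_cases h3 : a = x <;>
                    simp [h1, h2, h3])]
            simp only [List.append_assoc, List.singleton_append]
            congr 1
            congr 1
            apply List.filter_congr
            intro a _
            simp [Bool.and_assoc]
          · rw [show collect p E (x :: m) = collect p E m from by
              simp [collect, List.foldl_cons, if_neg hx]]
            rw [ih m hlen p E, fd_cons,
              List.filter_cons_of_neg (by
                simp only [Bool.and_eq_true, decide_eq_true_eq, not_and]
                intro h1 h2; exact hx ⟨h1, h2⟩),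
              fd_filter n m hlen, List.filter_filter]
            congr 1
            apply List.filter_congr
            intro a _
            by_cases h3 : a = x
            · subst h3
              by_cases h1 : p a = true <;> by_cases h2 : a ∈ E <;>
                first
                  | (simp [h1, h2]; exact absurd ⟨h1, h2⟩ hx)
                  | simp [h1, h2]
            · simp [h3]

-- the inner pass for the next new value u[k] emits [u[k], w] for the new values w it meets
lemma inner_new (u : List Int) (hn : u.Nodup) (k : Nat) (hk : k < u.length) :
    ∀ (m : List Int), (∀ s ∈ m, s ∈ u) → ∀ (E : List Int), (∀ e ∈ E, e ∈ u.drop (k + 1)) →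
    m.foldl (stepA u[k]) (triTake k u ++ E.map (fun y => [u[k], y]))
      = triTake k u ++ (collect (fun s => decide (s ∈ u.drop (k + 1))) E m).map (fun y => [u[k], y]) := by
  have hsplit : u = u.take (k + 1) ++ u.drop (k + 1) := (List.take_append_drop _ _).symm
  have htk : u.take (k + 1) = u.take k ++ [u[k]] := by
    rw [List.take_add_one, List.getElem?_eq_getElem hk]; rfl
  have hparts := hn
  rw [← List.take_append_drop k u, List.drop_eq_getElem_cons hk, List.nodup_append] at hparts
  obtain ⟨-, hcons, hdisj⟩ := hparts
  have hkd : u[k] ∉ u.drop (k + 1) := (List.nodup_cons.mp hcons).1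
  have hkt : u[k] ∉ u.take k := fun h => hdisj _ h _ (.head _) rfl
  have hdt : ∀ s ∈ u.drop (k + 1), s ∉ u.take k :=
    fun s hs ht => hdisj _ ht _ (List.mem_cons_of_mem _ hs) rfl
  intro m
  induction m with
  | nil => intro _ E _; rfl
  | cons s m ih =>
      intro hm E hE
      have hsu : s ∈ u := hm s (by simp)
      have hC1 : [u[k], s] ∉ triTake k u := by
        intro h
        obtain ⟨i, hik, hil, ha, -⟩ := (mem_triTake u k _ s).mp h
        have : i = k := List.Nodup.getElem_inj_iff hn |>.mp ha
        omega
      have hC2 : [s, u[k]] ∈ triTake k u ↔ s ∈ u.take k := by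
        constructor
        · intro h
          obtain ⟨i, hik, hil, ha, -⟩ := (mem_triTake u k s _).mp h
          rw [← ha]
          have h1 : i < (u.take k).length := by simp; omega
          have : (u.take k)[i]'h1 = u[i] := List.getElem_take
          rw [← this]; exact List.getElem_mem _
        · intro h
          obtain ⟨i, hi, hfi⟩ := List.getElem_of_mem h
          have hik : i < k := by simp at hi; omega
          have hil : i < u.length := by simp at hi; omega
          have hfi' : u[i] = s := by rw [← hfi]; exact (List.getElem_take).symm
          exact (mem_triTake u k s _).mpr
            ⟨i, hik, hil, hfi', getElem_mem_drop u i k hik hk⟩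
      have hM1 : [u[k], s] ∈ E.map (fun y => [u[k], y]) ↔ s ∈ E := by simp
      have hM2 : s ≠ u[k] → [s, u[k]] ∉ E.map (fun y => [u[k], y]) := by
        intro hne h
        simp only [List.mem_map] at h
        obtain ⟨y, hy, heq⟩ := h
        injection heq with h1 _
        exact hne h1.symm
      simp only [List.foldl_cons]
      by_cases hcond : s ∈ u.drop (k + 1) ∧ s ∉ E
      · obtain ⟨hd, hne⟩ := hcond
        have hsf : u[k] ≠ s := fun h => hkd (h ▸ hd)
        have hnt : s ∉ u.take k := hdt s hd
        have hstep : stepA u[k] (triTake k u ++ E.map (fun y => [u[k], y])) s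
            = triTake k u ++ (E ++ [s]).map (fun y => [u[k], y]) := by
          unfold stepA
          have hb1 : [u[k], s] ∉ triTake k u ++ E.map (fun y => [u[k], y]) := by
            intro h
            rcases List.mem_append.mp h with h | h
            · exact hC1 h
            · exact hne (hM1.mp h)
          have hb2 : [s, u[k]] ∉ triTake k u ++ E.map (fun y => [u[k], y]) := by
            intro h
            rcases List.mem_append.mp h with h | h
            · exact hnt (hC2.mp h)
            · exact hM2 (fun h' => hsf h'.symm) h
          rw [if_pos ⟨hsf, hb1, hb2⟩]
          simp [List.map_append, List.append_assoc]
        rw [hstep]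
        have hcol : collect (fun s => decide (s ∈ u.drop (k + 1))) E (s :: m)
            = collect (fun s => decide (s ∈ u.drop (k + 1))) (E ++ [s]) m := by
          simp only [collect, List.foldl_cons]
          rw [if_pos ⟨by simpa using hd, hne⟩]
        rw [hcol]
        exact ih (fun t ht => hm t (by simp [ht])) (E ++ [s])
          (by intro e he
              rcases List.mem_append.mp he with h | h
              · exact hE e h
              · simp at h; exact h ▸ hd)
      · have hstep : stepA u[k] (triTake k u ++ E.map (fun y => [u[k], y])) s
            = triTake k u ++ E.map (fun y => [u[k], y]) := by
          unfold stepA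
          rw [if_neg]
          rintro ⟨hne, hnm1, hnm2⟩
          have hsE : s ∉ E := fun h => hnm1 (List.mem_append.mpr (Or.inr (hM1.mpr h)))
          have hst : s ∉ u.take k := fun h =>
            hnm2 (List.mem_append.mpr (Or.inl (hC2.mpr h)))
          have hsd : s ∈ u.drop (k + 1) := by
            have := hsu
            rw [← List.take_append_drop k u, List.drop_eq_getElem_cons hk] at this
            rcases List.mem_append.mp this with h | h
            · exact absurd h hst
            · rcases List.mem_cons.mp h with h | h
              · exact absurd h.symm hne
              · exact h
          exact hcond ⟨hsd, hsE⟩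
        rw [hstep]
        have hcol : collect (fun s => decide (s ∈ u.drop (k + 1))) E (s :: m)
            = collect (fun s => decide (s ∈ u.drop (k + 1))) E m := by
          simp only [collect, List.foldl_cons]
          rw [if_neg (by
            rintro ⟨h1, h2⟩
            exact hcond ⟨by simpa using h1, h2⟩)]
        rw [hcol]
        exact ih (fun t ht => hm t (by simp [ht])) E hE

lemma outer_gen (q u : List Int) (hu : u = fd q) : ∀ (ol : List Int) (k : Nat),
    u.drop k = fd (ol.filter (fun s => decide (s ∉ u.take k))) → (∀ f ∈ ol, f ∈ u) →
    ol.foldl (fun c f => q.foldl (stepA f) c) (triTake k u) = allPairs u := by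
  have hnu : u.Nodup := by rw [hu]; exact nodup_fd q
  have hqu : ∀ s ∈ q, s ∈ u := by
    intro s hs; rw [hu, mem_fd]; exact hs
  intro ol
  induction ol with
  | nil =>
      intro k hdrop _
      simp only [List.filter_nil, fd] at hdrop
      exact triTake_ge u k (by rw [← List.drop_eq_nil_iff]; exact hdrop)
  | cons f ol ih =>
      intro k hdrop hmem
      simp only [List.foldl_cons]
      by_cases hf : f ∈ u.take k
      · rw [inner_old u hnu k f hf q hqu]
        rw [List.filter_cons_of_neg (by simpa using hf)] at hdrop
        exact ih k hdrop (fun g hg => hmem g (by simp [hg]))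
      · rw [List.filter_cons_of_pos (by simpa using hf), fd_cons] at hdrop
        have hklen : k < u.length := by
          rcases Nat.lt_or_ge k u.length with h | h
          · exact h
          · rw [List.drop_eq_nil_of_le h] at hdrop
            exact absurd hdrop.symm (by simp)
        rw [List.drop_eq_getElem_cons hklen] at hdrop
        have huk : u[k] = f := (List.cons.injEq _ _ _ _ ▸ hdrop).1
        have hrest : u.drop (k + 1)
            = fd ((ol.filter (fun s => decide (s ∉ u.take k))).filter (fun y => decide (y ≠ f))) :=
          (List.cons.injEq _ _ _ _ ▸ hdrop).2
        have hpass : q.foldl (stepA f) (triTake k u) = triTake (k + 1) u := by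
          have h0 : triTake k u
              = triTake k u ++ (([] : List Int).map (fun y => [u[k], y])) := by simp
          rw [← huk, h0, inner_new u hnu k hklen q hqu [] (by simp),
            collect_eq q.length q le_rfl _ []]
          have hfil : u.filter (fun s => decide (s ∈ u.drop (k + 1)) && decide (s ∉ ([] : List Int)))
              = u.drop (k + 1) := by
            conv_lhs => rw [← List.take_append_drop (k + 1) u]
            rw [List.filter_append]
            have hnd := hnu
            rw [← List.take_append_drop (k + 1) u, List.nodup_append] at hnd
            obtain ⟨-, -, hdisj⟩ := hnd
            rw [List.filter_eq_nil_iff.mpr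
                (fun a ha => by simp; exact fun hb => absurd rfl (hdisj _ ha _ hb)),
              List.filter_eq_self.mpr (fun a ha => by simp [ha])]
            simp
          rw [← hu, hfil, triTake_succ u k hklen, huk]
          simp
        rw [hpass]
        apply ih (k + 1) ?_ (fun g hg => hmem g (by simp [hg]))
        rw [hrest, List.filter_filter]
        congr 1
        apply List.filter_congr
        intro a _
        rw [List.take_add_one, List.getElem?_eq_getElem hklen]
        by_cases h1 : a ∈ u.take k <;> by_cases h2 : a = f <;> simp [h1, h2, huk]

lemma A_core (pairs : List Int) :
    (pairs.foldl (fun st firstpair =>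
      pairs.foldl (fun (st : List (List Int) × List (List Int)) secondpair =>
        if firstpair ≠ secondpair then
          if [firstpair, secondpair] ∉ st.2 then
            (st.1 ++ [[firstpair, secondpair]],
             st.2 ++ [[firstpair, secondpair], [secondpair, firstpair]])
          else st
        else st) st) (([] : List (List Int)), ([] : List (List Int)))).1
    = allPairs (fd pairs) := by
  have h0 : (([] : List (List Int)), ([] : List (List Int)))
      = (([] : List (List Int)), flatI ([] : List (List Int))) := rfl
  rw [h0, loopA_eq pairs pairs ([] : List (List Int))]
  show pairs.foldl (fun c f => pairs.foldl (stepA f) c) ([] : List (List Int)) = allPairs (fd pairs)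
  have h1 : ([] : List (List Int)) = triTake 0 (fd pairs) := rfl
  rw [h1]
  apply outer_gen pairs (fd pairs) rfl pairs 0
  · simp
  · intro f hf; rw [mem_fd]; exact hf

-- ===== VERDICT (by name: the statement is the Claim_ definition above) =====
theorem return_pair_combos_spec : Claim_equal_return_pair_combos := by
  intro pairs _
  unfold Spec_return_pair_combos return_pair_combos return_pair_combos_alt
  split_ifs with h1 h2
  · rfl
  · rfl
  · rw [A_core, dedup_foldl]
    simp
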